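-- pv_equiv track=rewrite | github.com/MinsangKong/DailyProblem | 06-11/2-2.py | solution
-- ===== SOURCE A (Python) =====
-- def get_dp(n, nums):
--     dp = [0] * n
--     dp[0] = nums[0]
--
--     for i in range(n):
--         dp[i] = nums[i]
--         if i == 0:
--             continue
--         if dp[i] < dp[i - 1] + nums[i]:
--             dp[i] = dp[i - 1] + nums[i]
--     return dp
--
-- def get_dp_r(n, nums):
--     dp = [0] * n
--     for i in range(n - 1, -1, -1):
--         dp[i] = nums[i]
--         if i == n - 1:
--             continue
--         if dp[i] < dp[i + 1] + nums[i]: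
--             dp[i] = dp[i + 1] + nums[i]
--     return dp
--
-- def solution(n, nums):
--     dp_l = get_dp(n, nums)
--     dp_r = get_dp_r(n, nums)
--
--     ans = max(dp_l)
--     for i in range(1, n - 1):
--         if ans < dp_l[i - 1] + dp_r[i + 1]:
--             ans = dp_l[i - 1] + dp_r[i + 1]
--
--     return ans
-- ===== SOURCE B (Python) =====
-- def solution(n, nums):
--     # One left-to-right pass with O(1) state: best subarray sum ending here with
--     # no deletion (no), with at most one deletion (one), and the global best.
--     no = one = best = nums[0]
--     for i in range(1, n):
--         x = nums[i]
--         one = max(one + x, no)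
--         no = max(no + x, x)
--         best = max(best, no, one)
--     return best
-- ===== Notes on version B (the rewrite author's own statement) =====
-- stated objective: simpler
-- what changed: Replaced the two DP arrays (prefix-best, suffix-best) plus a separate combine loop by a single left-to-right pass keeping three scalars (best subarray sum ending here without deletion, with at most one deletion, and the global best), using O(1) extra space instead of O(n).
import Mathlib
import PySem

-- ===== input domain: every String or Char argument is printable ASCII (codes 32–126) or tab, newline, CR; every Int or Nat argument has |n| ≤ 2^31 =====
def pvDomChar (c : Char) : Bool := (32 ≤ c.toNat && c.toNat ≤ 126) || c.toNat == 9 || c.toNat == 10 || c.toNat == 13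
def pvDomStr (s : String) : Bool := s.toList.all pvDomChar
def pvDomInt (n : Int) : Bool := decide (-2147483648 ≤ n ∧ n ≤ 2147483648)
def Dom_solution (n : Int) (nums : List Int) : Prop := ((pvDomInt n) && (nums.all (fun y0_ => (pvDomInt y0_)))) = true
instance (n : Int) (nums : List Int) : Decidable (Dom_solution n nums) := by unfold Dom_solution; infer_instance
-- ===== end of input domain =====

-- B replaces A's two DP arrays and combine loop by one pass with three scalars (O(1) space).

-- ===== PORT A =====
def getDp (n : Int) (nums : List Int) : List Int :=
  let dp0 := List.replicate n.toNat 0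
  let dp1 := PySem.List.pySetD dp0 0 (PySem.List.pyGetD nums 0 0)
  (PySem.List.pyRange 0 n 1).foldl (fun dp i =>
    let dp := PySem.List.pySetD dp i (PySem.List.pyGetD nums i 0)
    if i == 0 then dp
    else if PySem.List.pyGetD dp i 0 < PySem.List.pyGetD dp (i-1) 0 + PySem.List.pyGetD nums i 0 then
      PySem.List.pySetD dp i (PySem.List.pyGetD dp (i-1) 0 + PySem.List.pyGetD nums i 0)
    else dp) dp1

def getDpR (n : Int) (nums : List Int) : List Int :=
  let dp0 := List.replicate n.toNat 0
  (PySem.List.pyRange (n-1) (-1) (-1)).foldl (fun dp i =>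
    let dp := PySem.List.pySetD dp i (PySem.List.pyGetD nums i 0)
    if i == n - 1 then dp
    else if PySem.List.pyGetD dp i 0 < PySem.List.pyGetD dp (i+1) 0 + PySem.List.pyGetD nums i 0 then
      PySem.List.pySetD dp i (PySem.List.pyGetD dp (i+1) 0 + PySem.List.pyGetD nums i 0)
    else dp) dp0

def solution (n : Int) (nums : List Int) : Int :=
  let dpL := getDp n nums
  let dpR := getDpR n nums
  let ans := (PySem.List.max? dpL (fun x => x)).getD 0
  (PySem.List.pyRange 1 (n-1) 1).foldl (fun ans i =>
    if ans < PySem.List.pyGetD dpL (i-1) 0 + PySem.List.pyGetD dpR (i+1) 0 then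
      PySem.List.pyGetD dpL (i-1) 0 + PySem.List.pyGetD dpR (i+1) 0
    else ans) ans

-- ===== PORT B =====
def solution_alt (n : Int) (nums : List Int) : Int :=
  let a0 := PySem.List.pyGetD nums 0 0
  let st := (PySem.List.pyRange 1 n 1).foldl (fun (st : Int × Int × Int) i =>
    let x := PySem.List.pyGetD nums i 0
    let one := max (st.2.1 + x) st.1
    let no := max (st.1 + x) x
    let best := max (max st.2.2 no) one
    (no, one, best)) (a0, a0, a0)
  st.2.2

-- ===== PRECONDITION & SPEC =====
-- Pre_: Python A raises IndexError when n < 1 (dp[0] on an empty dp) or n > len(nums).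
def Pre_solution (n : Int) (nums : List Int) : Prop := 1 ≤ n ∧ n ≤ nums.length
instance (n : Int) (nums : List Int) : Decidable (Pre_solution n nums) := by unfold Pre_solution; infer_instance
def pvWitness_solution : Int × List Int := (3, [1, -2, 3])

def Spec_solution (n : Int) (nums : List Int) (out : Int) : Prop := out = solution_alt n nums
instance (n : Int) (nums : List Int) (out : Int) : Decidable (Spec_solution n nums out) := by unfold Spec_solution; infer_instance

-- ===== CLAIM (what is proved, stated in full; the proofs are below) =====
def Claim_equal_solution : Prop := ∀ (n : Int) (nums : List Int), Dom_solution n nums → Pre_solution n nums → Spec_solution n nums (solution n nums)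

-- ===== LEMMAS AND PROOFS =====

-- reference scalars: xg i = nums[i]; dpl i = best sum ending at i; dpr m i = best sum
-- starting at i within [0,m); Mv = running max of dpl; TBv = B's one-deletion state;
-- Bv = B's running best; ansA = A's answer shape (max of dp_l, then the combine loop)
def xg (nums : List Int) (i : Nat) : Int := nums.getD i 0
def dpl (nums : List Int) : Nat → Int
  | 0 => xg nums 0
  | i+1 => max (dpl nums i + xg nums (i+1)) (xg nums (i+1))
def dprA (nums : List Int) (m : Nat) : Nat → Int
  | 0 => xg nums (m-1)
  | k+1 => max (xg nums (m-2-k)) (dprA nums m k + xg nums (m-2-k))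
def dpr (nums : List Int) (m i : Nat) : Int := dprA nums m (m-1-i)
def Mv (nums : List Int) : Nat → Int
  | 0 => xg nums 0
  | i+1 => max (Mv nums i) (dpl nums (i+1))
def TBv (nums : List Int) : Nat → Int
  | 0 => xg nums 0
  | i+1 => max (TBv nums i + xg nums (i+1)) (dpl nums i)
def Bv (nums : List Int) : Nat → Int
  | 0 => xg nums 0
  | i+1 => max (max (Bv nums i) (dpl nums (i+1))) (TBv nums (i+1))
def ansA (nums : List Int) (m : Nat) : Int :=
  (List.range (m-2)).foldl (fun a k => max a (dpl nums k + dpr nums m (k+2))) (Mv nums (m-1))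

theorem ifmax (a b : Int) : (if a < b then b else a) = max a b := by
  rcases lt_or_ge a b with h | h
  · simp [h, max_eq_right h.le]
  · simp [not_lt.mpr h, max_eq_left h]

theorem le_foldl_max_init (l : List Nat) (f : Nat → Int) (init : Int) :
    init ≤ l.foldl (fun a k => max a (f k)) init := by
  induction l generalizing init with
  | nil => exact le_refl _
  | cons a t ih => exact le_trans (le_max_left _ _) (ih _)
theorem le_foldl_max_mem (l : List Nat) (f : Nat → Int) (init : Int) (k : Nat) (hk : k ∈ l) :
    f k ≤ l.foldl (fun a k => max a (f k)) init := by
  induction l generalizing init with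
  | nil => cases hk
  | cons a t ih =>
      rcases List.mem_cons.mp hk with h | h
      · subst h; exact le_trans (le_max_right _ _) (le_foldl_max_init _ _ _)
      · exact ih _ h
theorem foldl_max_le_of (l : List Nat) (f : Nat → Int) (init z : Int)
    (h0 : init ≤ z) (h : ∀ k ∈ l, f k ≤ z) :
    l.foldl (fun a k => max a (f k)) init ≤ z := by
  induction l generalizing init with
  | nil => exact h0
  | cons a t ih =>
      exact ih _ (max_le h0 (h a List.mem_cons_self)) (fun k hk => h k (List.mem_cons_of_mem _ hk))


theorem altInv (nums : List Int) (j : Nat) :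
    (PySem.List.pyRange 1 (1 + (j:Int)) 1).foldl (fun (st : Int × Int × Int) i =>
      let x := PySem.List.pyGetD nums i 0
      let one := max (st.2.1 + x) st.1
      let no := max (st.1 + x) x
      let best := max (max st.2.2 no) one
      (no, one, best)) (xg nums 0, xg nums 0, xg nums 0)
    = (dpl nums j, TBv nums j, Bv nums j) := by
  induction j with
  | zero => simp [PySem.List.pyRange_one_eq_nil, dpl, TBv, Bv]
  | succ j ih =>
      have hsplit : PySem.List.pyRange 1 (1 + ((j:Int)+1)) 1
          = PySem.List.pyRange 1 (1 + (j:Int)) 1 ++ [1 + (j:Int)] := by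
        have := PySem.List.pyRange_one_succ_right (a:=1) (b:=1 + (j:Int)) (by omega)
        rw [show (1 + ((j:Int)+1)) = 1 + (j:Int) + 1 by ring, this]
      push_cast
      rw [hsplit, List.foldl_append, ih]
      have hx : PySem.List.pyGetD nums (1 + (j:Int)) 0 = xg nums (j+1) := by
        rw [show (1 + (j:Int)) = ((j+1 : Nat) : Int) by push_cast; ring,
          PySem.List.pyGetD_natCast]
        rfl
      simp only [List.foldl_cons, List.foldl_nil, hx]
      simp [dpl, TBv, Bv]


theorem getDpInv (nums : List Int) (m : Nat) (hm : 1 ≤ m) (j : Nat) (hj : 1 ≤ j) (hjm : j ≤ m) :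
    (PySem.List.pyRange 0 (j:Int) 1).foldl (fun dp i =>
      let dp := PySem.List.pySetD dp i (PySem.List.pyGetD nums i 0)
      if i == 0 then dp
      else if PySem.List.pyGetD dp i 0 < PySem.List.pyGetD dp (i-1) 0 + PySem.List.pyGetD nums i 0 then
        PySem.List.pySetD dp i (PySem.List.pyGetD dp (i-1) 0 + PySem.List.pyGetD nums i 0)
      else dp)
      (PySem.List.pySetD (List.replicate m (0:Int)) 0 (PySem.List.pyGetD nums 0 0))
    = (List.range j).map (dpl nums) ++ List.replicate (m - j) 0 := by
  induction j, hj using Nat.le_induction with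
  | base =>
      rw [show ((1:Nat):Int) = 0 + 1 by norm_num, PySem.List.pyRange_one_singleton]
      simp only [List.foldl_cons, List.foldl_nil]
      rw [show (0:Int) = ((0:Nat):Int) by rfl, PySem.List.pySetD_natCast, PySem.List.pySetD_natCast]
      simp only [List.set_set, beq_self_eq_true, if_true]
      rw [show m = (m-1)+1 by omega, List.replicate_succ]
      simp [PySem.List.pyGetD_zero, dpl, xg]
  | succ j hj ih =>
      have ihm := ih (by omega)
      have hsplit : PySem.List.pyRange 0 ((j:Int)+1) 1
          = PySem.List.pyRange 0 (j:Int) 1 ++ [(j:Int)] :=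
        PySem.List.pyRange_one_succ_right (a:=0) (b:=(j:Int)) (by omega)
      push_cast
      rw [hsplit, List.foldl_append, ihm]
      simp only [List.foldl_cons, List.foldl_nil]
      have hlenmap : ((List.range j).map (dpl nums)).length = j := by simp
      -- the first set
      have hset : ∀ v : Int,
          PySem.List.pySetD ((List.range j).map (dpl nums) ++ List.replicate (m - j) 0) (j:Int) v
          = (List.range j).map (dpl nums) ++ v :: List.replicate (m - (j+1)) 0 := by
        intro v
        rw [PySem.List.pySetD_natCast, List.set_append]
        simp only [hlenmap, lt_irrefl, if_false, Nat.sub_self]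
        rw [show m - j = (m - (j+1)) + 1 by omega, List.replicate_succ]
        rfl
      rw [hset]
      have hif0 : (((j:Int)) == 0) = false := by
        simp only [beq_eq_false_iff_ne]; omega
      rw [hif0]
      simp only [Bool.false_eq_true, if_false]
      -- reads
      have hgetj : PySem.List.pyGetD ((List.range j).map (dpl nums) ++
          PySem.List.pyGetD nums (j:Int) 0 :: List.replicate (m - (j+1)) 0) (j:Int) 0
          = PySem.List.pyGetD nums (j:Int) 0 := by
        rw [PySem.List.pyGetD_natCast, List.getD_append_right _ _ _ _ (by omega)]
        simp [hlenmap]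
      have hgetj1 : PySem.List.pyGetD ((List.range j).map (dpl nums) ++
          PySem.List.pyGetD nums (j:Int) 0 :: List.replicate (m - (j+1)) 0) ((j:Int)-1) 0
          = dpl nums (j-1) := by
        rw [show ((j:Int)-1) = ((j-1:Nat):Int) by omega, PySem.List.pyGetD_natCast,
          List.getD_append _ _ _ _ (by omega), PySem.List.getD_map_range _ _ _ _ (by omega)]
      rw [hgetj, hgetj1]
      have hx : PySem.List.pyGetD nums (j:Int) 0 = xg nums j := by
        rw [PySem.List.pyGetD_natCast]; rfl
      have hdpl : dpl nums j = max (dpl nums (j-1) + xg nums j) (xg nums j) := by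
        rw [show j = (j-1)+1 by omega]; simp [dpl]
      rw [show (List.range (j+1)).map (dpl nums)
          = (List.range j).map (dpl nums) ++ [dpl nums j] by rw [List.range_succ]; simp]
      rw [List.append_assoc, List.singleton_append]
      have hset2 : ∀ w v : Int,
          PySem.List.pySetD ((List.range j).map (dpl nums) ++ w :: List.replicate (m - (j+1)) 0) (j:Int) v
          = (List.range j).map (dpl nums) ++ v :: List.replicate (m - (j+1)) 0 := by
        intro w v
        rw [PySem.List.pySetD_natCast, List.set_append]
        simp [hlenmap]
      split_ifs with h
      · rw [hset2]
        rw [hdpl, hx, max_eq_left (by rw [hx] at h; omega)]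
      · rw [hdpl, hx, max_eq_right (by rw [hx] at h; omega)]


theorem dpr_last (nums : List Int) (m : Nat) : dpr nums m (m-1) = xg nums (m-1) := by
  unfold dpr; simp [dprA]

theorem dpr_rec (nums : List Int) (m i : Nat) (h : i + 1 ≤ m - 1) :
    dpr nums m i = max (xg nums i) (dpr nums m (i+1) + xg nums i) := by
  unfold dpr
  have h1 : m - 1 - i = (m - 2 - i) + 1 := by omega
  have h2 : m - 2 - (m - 2 - i) = i := by omega
  have h3 : m - 1 - (i + 1) = m - 2 - i := by omega
  rw [h1, h3]; simp [dprA, h2]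

theorem pyRange_neg_succ_right (a b : Int) (h : b ≤ a) :
    PySem.List.pyRange a (b-1) (-1) = PySem.List.pyRange a b (-1) ++ [b] := by
  rw [PySem.List.pyRange_neg_one_eq_reverse, PySem.List.pyRange_neg_one_eq_reverse,
    show b-1+1 = b by ring, PySem.List.pyRange_one_cons (show b < a+1 by omega)]
  simp

theorem getDpRInv (nums : List Int) (n : Int) (hn : 1 ≤ n) (j : Nat) (hj : 1 ≤ j) (hjm : (j:Int) ≤ n) :
    (PySem.List.pyRange (n-1) (n-1-(j:Int)) (-1)).foldl (fun dp i =>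
      let dp := PySem.List.pySetD dp i (PySem.List.pyGetD nums i 0)
      if i == n - 1 then dp
      else if PySem.List.pyGetD dp i 0 < PySem.List.pyGetD dp (i+1) 0 + PySem.List.pyGetD nums i 0 then
        PySem.List.pySetD dp i (PySem.List.pyGetD dp (i+1) 0 + PySem.List.pyGetD nums i 0)
      else dp)
      (List.replicate n.toNat (0:Int))
    = List.replicate (n.toNat - j) 0
      ++ (List.range j).map (fun t => dpr nums n.toNat (n.toNat - j + t)) := by
  have hmn : ((n.toNat : Nat) : Int) = n := Int.toNat_of_nonneg (by omega)
  set m := n.toNat with hm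
  induction j, hj using Nat.le_induction with
  | base =>
      have h1 : PySem.List.pyRange (n-1) (n-1-((1:Nat):Int)) (-1) = [n-1] := by
        rw [PySem.List.pyRange_neg_one_cons (by push_cast; omega),
          PySem.List.pyRange_neg_one_eq_nil (by push_cast; omega)]
      rw [h1]
      simp only [List.foldl_cons, List.foldl_nil]
      rw [show (n-1 : Int) = ((m-1 : Nat) : Int) by omega, PySem.List.pySetD_natCast]
      rw [show List.replicate m (0:Int) = List.replicate (m-1) 0 ++ [0] by
        rw [← List.replicate_succ']; congr 1; omega]
      rw [List.set_append]
      simp only [List.length_replicate, lt_irrefl, if_false, Nat.sub_self]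
      rw [beq_self_eq_true, if_pos rfl]
      rw [PySem.List.pyGetD_natCast]
      simp only [List.set_cons_zero]
      simp [dpr_last, xg]
  | succ j hj ih =>
      have ihm := ih (by omega)
      have hsplit : PySem.List.pyRange (n-1) (n-1-((j:Int)+1)) (-1)
          = PySem.List.pyRange (n-1) (n-1-(j:Int)) (-1) ++ [n-1-(j:Int)] := by
        rw [show n-1-((j:Int)+1) = (n-1-(j:Int))-1 by ring]
        exact pyRange_neg_succ_right _ _ (by omega)
      push_cast
      rw [hsplit, List.foldl_append, ihm]
      simp only [List.foldl_cons, List.foldl_nil]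
      have hi0 : (n-1-(j:Int)) = ((m-1-j : Nat) : Int) := by omega
      -- first set: into the tail of the replicate prefix
      have hrep : List.replicate (m-j) (0:Int) = List.replicate (m-j-1) 0 ++ [0] := by
        rw [← List.replicate_succ']; congr 1; omega
      have hset1 : ∀ v : Int,
          PySem.List.pySetD (List.replicate (m-j) (0:Int)
            ++ (List.range j).map (fun t => dpr nums m (m - j + t))) (n-1-(j:Int)) v
          = List.replicate (m-j-1) 0 ++ v :: (List.range j).map (fun t => dpr nums m (m - j + t)) := by
        intro v
        rw [hi0, PySem.List.pySetD_natCast, hrep, List.append_assoc, List.singleton_append,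
          List.set_append]
        simp [show ¬(m-1-j < m-j-1) by omega, show m-1-j-(m-j-1) = 0 by omega]
      rw [hset1]
      have hif : ((n-1-(j:Int)) == n - 1) = false := by
        simp only [beq_eq_false_iff_ne]; omega
      rw [hif]
      simp only [Bool.false_eq_true, if_false]
      set L := (List.range j).map (fun t => dpr nums m (m - j + t)) with hL
      have hx : PySem.List.pyGetD nums (n-1-(j:Int)) 0 = xg nums (m-1-j) := by
        rw [hi0, PySem.List.pyGetD_natCast]; rfl
      have hget1 : PySem.List.pyGetD (List.replicate (m-j-1) (0:Int)
          ++ PySem.List.pyGetD nums (n-1-(j:Int)) 0 :: L) (n-1-(j:Int)) 0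
          = xg nums (m-1-j) := by
        rw [hi0, PySem.List.pyGetD_natCast,
          List.getD_append_right _ _ _ _ (by simp only [List.length_replicate]; omega)]
        simp only [List.length_replicate, show m-1-j-(m-j-1) = 0 by omega, List.getD_cons_zero]
        rw [← hi0, hx]
      have hget2 : PySem.List.pyGetD (List.replicate (m-j-1) (0:Int)
          ++ PySem.List.pyGetD nums (n-1-(j:Int)) 0 :: L) ((n-1-(j:Int))+1) 0
          = dpr nums m (m-j) := by
        rw [show (n-1-(j:Int))+1 = ((m-j : Nat):Int) by omega, PySem.List.pyGetD_natCast,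
          List.getD_append_right _ _ _ _ (by simp only [List.length_replicate]; omega)]
        simp only [List.length_replicate, show m-j-(m-j-1) = 1 by omega, List.getD_cons_succ]
        rw [hL, PySem.List.getD_map_range _ _ _ _ (by omega)]
        simp
      rw [hget1, hget2, hx]
      have hset2 : ∀ w v : Int,
          PySem.List.pySetD (List.replicate (m-j-1) (0:Int) ++ w :: L) (n-1-(j:Int)) v
          = List.replicate (m-j-1) 0 ++ v :: L := by
        intro w v
        rw [hi0, PySem.List.pySetD_natCast, List.set_append]
        simp [show ¬ (m-1-j < m-j-1) by omega, show m-1-j-(m-j-1) = 0 by omega]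
      have hval : dpr nums m (m-1-j) = max (xg nums (m-1-j)) (dpr nums m (m-j) + xg nums (m-1-j)) := by
        rw [dpr_rec nums m (m-1-j) (by omega), show m-1-j+1 = m-j by omega]
      have hR : List.replicate (m-(j+1)) (0:Int)
            ++ (List.range (j+1)).map (fun t => dpr nums m (m - (j+1) + t))
          = List.replicate (m-j-1) 0 ++ dpr nums m (m-1-j) :: L := by
        rw [List.range_succ_eq_map, List.map_cons, List.map_map,
          show m-(j+1) = m-j-1 by omega]
        congr 1
        congr 1
        · congr 1; omega
        · rw [hL]; apply List.map_congr_left; intro t ht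
          simp only [Function.comp_apply]
          congr 1; omega
      rw [hR]
      split_ifs with h
      · rw [hset2, hval, max_eq_right (by omega)]
      · rw [hval, max_eq_left (by omega)]


theorem Mv_mono (nums : List Int) {i j : Nat} (h : i ≤ j) : Mv nums i ≤ Mv nums j := by
  induction j with
  | zero => simp [Nat.le_zero.mp h]
  | succ j ih =>
      rcases Nat.lt_or_ge i (j+1) with h' | h'
      · exact le_trans (ih (by omega)) (le_max_left _ _)
      · rw [show i = j+1 by omega]
theorem dpl_le_Mv (nums : List Int) (i : Nat) : dpl nums i ≤ Mv nums i := by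
  cases i with
  | zero => exact le_refl _
  | succ i => exact le_max_right _ _
theorem Mv_le_ansA (nums : List Int) (m : Nat) : Mv nums (m-1) ≤ ansA nums m :=
  le_foldl_max_init _ _ _
theorem cand_le_ansA (nums : List Int) (m k : Nat) (hk : k < m-2) :
    dpl nums k + dpr nums m (k+2) ≤ ansA nums m :=
  le_foldl_max_mem _ _ _ _ (List.mem_range.mpr hk)

-- Pv: allowed "carry" before position i
def Pv (nums : List Int) : Nat → Int
  | 0 => 0
  | i+1 => max 0 (dpl nums i)

theorem Pv_nonneg (nums : List Int) (i : Nat) : 0 ≤ Pv nums i := by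
  cases i with
  | zero => exact le_refl _
  | succ i => exact le_max_left _ _

theorem carry_le_dpl (nums : List Int) (i : Nat) (c : Int) (hc : c ≤ Pv nums i) :
    c + xg nums i ≤ dpl nums i := by
  cases i with
  | zero => simp only [Pv] at hc; simp [dpl]; omega
  | succ i =>
      simp only [Pv] at hc; simp only [dpl]
      rcases le_total (0:Int) (dpl nums i) with h | h
      · have hc' : c ≤ dpl nums i := by rw [max_eq_right h] at hc; exact hc
        exact le_trans (by omega) (le_max_left _ _)
      · have hc' : c ≤ 0 := by rw [max_eq_left h] at hc; exact hc
        exact le_trans (by omega) (le_max_right _ _)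

-- L6: carried dpr is bounded by Mv
theorem carry_dpr_le_Mv (nums : List Int) (m : Nat) :
    ∀ t i c, i ≤ m-1 → m-1-i = t → c ≤ Pv nums i → c + dpr nums m i ≤ Mv nums (m-1) := by
  intro t
  induction t with
  | zero =>
      intro i c hi ht hc
      rw [show i = m-1 by omega, dpr_last]
      exact le_trans (carry_le_dpl nums (m-1) c (by rw [show i = m-1 by omega] at hc; exact hc))
        (le_trans (dpl_le_Mv _ _) (Mv_mono _ (le_refl _)))
  | succ t ih =>
      intro i c hi ht hc
      rw [dpr_rec nums m i (by omega)]
      have h1 : c + xg nums i ≤ dpl nums i := carry_le_dpl nums i c hc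
      have h3 : (c + xg nums i) + dpr nums m (i+1) ≤ Mv nums (m-1) :=
        ih (i+1) _ (by omega) (by omega)
          (by simp only [Pv]; exact le_trans h1 (le_max_right _ _))
      have h4 : dpl nums i ≤ Mv nums (m-1) := le_trans (dpl_le_Mv _ _) (Mv_mono _ (by omega))
      rcases le_total (xg nums i) (dpr nums m (i+1) + xg nums i) with h | h
      · rw [max_eq_right h]; omega
      · rw [max_eq_left h]; omega

theorem dpr_le_Mv (nums : List Int) (m : Nat) (i : Nat) (hi : i ≤ m-1) :
    dpr nums m i ≤ Mv nums (m-1) := by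
  have := carry_dpr_le_Mv nums m (m-1-i) i 0 hi rfl (Pv_nonneg nums i)
  omega

def Ev (nums : List Int) (m i : Nat) : Int := if i < m then max 0 (dpr nums m i) else 0

theorem Ev_nonneg (nums : List Int) (m i : Nat) : 0 ≤ Ev nums m i := by
  unfold Ev; split
  · exact le_max_left _ _
  · exact le_refl _

theorem step_Ev (nums : List Int) (m i : Nat) (hi : i ≤ m-1) (hm : 1 ≤ m) :
    xg nums i + Ev nums m (i+1) ≤ Ev nums m i := by
  have hEi : Ev nums m i = max 0 (dpr nums m i) := by unfold Ev; rw [if_pos (by omega)]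
  rcases Nat.lt_or_ge (i+1) m with h | h
  · have hE1 : Ev nums m (i+1) = max 0 (dpr nums m (i+1)) := by unfold Ev; rw [if_pos h]
    have hrec := dpr_rec nums m i (by omega)
    rw [hE1, hEi]
    rcases le_total (0:Int) (dpr nums m (i+1)) with h' | h'
    · rw [max_eq_right h']
      have : dpr nums m i ≤ max 0 (dpr nums m i) := le_max_right _ _
      rw [hrec] at this
      rcases le_total (xg nums i) (dpr nums m (i+1) + xg nums i) with h'' | h''
      · rw [max_eq_right h''] at this; omega
      · rw [max_eq_left h''] at this; omega
    · rw [max_eq_left h']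
      have : dpr nums m i ≤ max 0 (dpr nums m i) := le_max_right _ _
      rw [hrec] at this
      rcases le_total (xg nums i) (dpr nums m (i+1) + xg nums i) with h'' | h''
      · rw [max_eq_right h''] at this; omega
      · rw [max_eq_left h''] at this; omega
  · -- i = m-1
    have hie : i = m-1 := by omega
    have hE1 : Ev nums m (i+1) = 0 := by unfold Ev; rw [if_neg (by omega)]
    have : dpr nums m i ≤ max 0 (dpr nums m i) := le_max_right _ _
    rw [hE1, hEi, show xg nums i = dpr nums m i by rw [hie, dpr_last]]
    omega

theorem TB_bound (nums : List Int) (m : Nat) (hm : 1 ≤ m) :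
    ∀ i, i ≤ m-1 → TBv nums i + Ev nums m (i+1) ≤ ansA nums m := by
  intro i
  induction i with
  | zero =>
      intro _
      simp only [TBv]
      rcases Nat.lt_or_ge 1 m with h | h
      · have hE : Ev nums m 1 = max 0 (dpr nums m 1) := by unfold Ev; rw [if_pos h]
        have hrec := dpr_rec nums m 0 (by omega)
        have hd : dpr nums m 0 ≤ Mv nums (m-1) := dpr_le_Mv nums m 0 (by omega)
        have hM : Mv nums (m-1) ≤ ansA nums m := Mv_le_ansA nums m
        have hx0 : xg nums 0 ≤ Mv nums (m-1) :=
          le_trans (dpl_le_Mv nums 0) (Mv_mono _ (by omega))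
        rw [hE]
        rcases le_total (0:Int) (dpr nums m 1) with h' | h'
        · rw [max_eq_right h']
          rcases le_total (xg nums 0) (dpr nums m 1 + xg nums 0) with h'' | h''
          · rw [max_eq_right h''] at hrec; omega
          · rw [max_eq_left h''] at hrec; omega
        · rw [max_eq_left h']
          have hx : xg nums 0 ≤ ansA nums m := le_trans hx0 hM
          omega
      · have hE : Ev nums m 1 = 0 := by unfold Ev; rw [if_neg (by omega)]
        have hx0 : xg nums 0 ≤ Mv nums (m-1) :=
          le_trans (dpl_le_Mv nums 0) (Mv_mono _ (by omega))
        have hM := Mv_le_ansA nums m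
        rw [hE]; omega
  | succ i ih =>
      intro hi
      have ihh := ih (by omega)
      simp only [TBv]
      have hb1 : TBv nums i + xg nums (i+1) + Ev nums m (i+2) ≤ ansA nums m := by
        have hs := step_Ev nums m (i+1) (by omega) hm
        have he : Ev nums m (i+1+1) = Ev nums m (i+2) := rfl
        omega
      have hb2 : dpl nums i + Ev nums m (i+2) ≤ ansA nums m := by
        rcases Nat.lt_or_ge (i+2) m with h | h
        · have hE : Ev nums m (i+2) = max 0 (dpr nums m (i+2)) := by unfold Ev; rw [if_pos h]
          have hMi : dpl nums i ≤ ansA nums m :=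
            le_trans (le_trans (dpl_le_Mv _ _) (Mv_mono _ (by omega))) (Mv_le_ansA nums m)
          have hcand : dpl nums i + dpr nums m (i+2) ≤ ansA nums m :=
            cand_le_ansA nums m i (by omega)
          rw [hE]
          rcases le_total (0:Int) (dpr nums m (i+2)) with h' | h'
          · rw [max_eq_right h']; omega
          · rw [max_eq_left h']; omega
        · have hE : Ev nums m (i+2) = 0 := by unfold Ev; rw [if_neg (by omega)]
          have hMi : dpl nums i ≤ ansA nums m :=
            le_trans (le_trans (dpl_le_Mv _ _) (Mv_mono _ (by omega))) (Mv_le_ansA nums m)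
          rw [hE]; omega
      rcases le_total (TBv nums i + xg nums (i+1)) (dpl nums i) with h | h
      · rw [max_eq_right h]; omega
      · rw [max_eq_left h]; omega

theorem Bv_le_ansA (nums : List Int) (m : Nat) (hm : 1 ≤ m) :
    Bv nums (m-1) ≤ ansA nums m := by
  have key : ∀ i, i ≤ m-1 → Bv nums i ≤ ansA nums m := by
    intro i
    induction i with
    | zero =>
        intro _
        exact le_trans (le_trans (dpl_le_Mv nums 0) (Mv_mono _ (by omega))) (Mv_le_ansA nums m)
    | succ i ih =>
        intro hi
        simp only [Bv]
        have h1 := ih (by omega)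
        have h2 : dpl nums (i+1) ≤ ansA nums m :=
          le_trans (le_trans (dpl_le_Mv _ _) (Mv_mono _ (by omega))) (Mv_le_ansA nums m)
        have h3 : TBv nums (i+1) ≤ ansA nums m := by
          have ht := TB_bound nums m hm (i+1) (by omega)
          have hn := Ev_nonneg nums m (i+2)
          have he : Ev nums m (i+1+1) = Ev nums m (i+2) := rfl
          omega
        exact max_le (max_le h1 h2) h3
  exact key (m-1) (le_refl _)

-- ===== other direction =====
theorem Bv_mono (nums : List Int) {i j : Nat} (h : i ≤ j) : Bv nums i ≤ Bv nums j := by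
  induction j with
  | zero => simp [Nat.le_zero.mp h]
  | succ j ih =>
      rcases Nat.lt_or_ge i (j+1) with h' | h'
      · exact le_trans (ih (by omega)) (le_trans (le_max_left _ _) (le_max_left _ _))
      · rw [show i = j+1 by omega]
theorem TBv_le_Bv (nums : List Int) (i : Nat) : TBv nums i ≤ Bv nums i := by
  cases i with
  | zero => exact le_refl _
  | succ i => exact le_max_right _ _
theorem Mv_le_Bv (nums : List Int) (i : Nat) : Mv nums i ≤ Bv nums i := by
  induction i with
  | zero => exact le_refl _
  | succ i ih =>
      simp only [Mv, Bv]
      exact max_le (le_trans ih (le_trans (le_max_left _ _) (le_max_left _ _)))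
        (le_trans (le_max_right _ _) (le_max_left _ _))

theorem carry_dpr_le_Bv (nums : List Int) (m : Nat) (hm : 1 ≤ m) :
    ∀ t j c, 1 ≤ j → j ≤ m-1 → m-1-j = t → c + xg nums j ≤ TBv nums j →
      c + dpr nums m j ≤ Bv nums (m-1) := by
  intro t
  induction t with
  | zero =>
      intro j c hj1 hj ht hc
      rw [show j = m-1 by omega, dpr_last]
      calc c + xg nums (m-1) ≤ TBv nums (m-1) := by rw [show m-1 = j by omega]; exact hc
        _ ≤ Bv nums (m-1) := TBv_le_Bv _ _
  | succ t ih =>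
      intro j c hj1 hj ht hc
      rw [dpr_rec nums m j (by omega)]
      have h1 : c + xg nums j ≤ Bv nums (m-1) :=
        le_trans hc (le_trans (TBv_le_Bv _ _) (Bv_mono _ (by omega)))
      have h2 : (c + xg nums j) + dpr nums m (j+1) ≤ Bv nums (m-1) := by
        apply ih (j+1) _ (by omega) (by omega) (by omega)
        have : TBv nums j + xg nums (j+1) ≤ TBv nums (j+1) := by
          simp only [TBv]; exact le_max_left _ _
        omega
      rcases le_total (xg nums j) (dpr nums m (j+1) + xg nums j) with h | h
      · rw [max_eq_right h]; omega
      · rw [max_eq_left h]; omega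

theorem cand_le_Bv (nums : List Int) (m k : Nat) (hm : 1 ≤ m) (hk : k < m-2) :
    dpl nums k + dpr nums m (k+2) ≤ Bv nums (m-1) := by
  apply carry_dpr_le_Bv nums m hm (m-1-(k+2)) (k+2) _ (by omega) (by omega) rfl
  have h1 : dpl nums k ≤ TBv nums (k+1) := by
    simp only [TBv]; exact le_max_right _ _
  have h2 : TBv nums (k+1) + xg nums (k+2) ≤ TBv nums (k+2) := by
    simp only [TBv]; exact le_max_left _ _
  omega

theorem ansA_le_Bv (nums : List Int) (m : Nat) (hm : 1 ≤ m) :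
    ansA nums m ≤ Bv nums (m-1) := by
  unfold ansA
  apply foldl_max_le_of
  · exact Mv_le_Bv nums (m-1)
  · intro k hk
    exact cand_le_Bv nums m k hm (List.mem_range.mp hk)

theorem core_eq (nums : List Int) (m : Nat) (hm : 1 ≤ m) :
    ansA nums m = Bv nums (m - 1) :=
  le_antisymm (ansA_le_Bv nums m hm) (Bv_le_ansA nums m hm)

theorem foldl_ext (l : List Nat) (f g : Int → Nat → Int) (init : Int)
    (h : ∀ acc k, k ∈ l → f acc k = g acc k) : l.foldl f init = l.foldl g init := by
  induction l generalizing init with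
  | nil => rfl
  | cons a t ih =>
      rw [List.foldl_cons, List.foldl_cons, h _ _ List.mem_cons_self]
      exact ih _ (fun acc k hk => h acc k (List.mem_cons_of_mem _ hk))

theorem Mv_foldl (nums : List Int) (j : Nat) :
    ((List.range j).map (fun k => dpl nums (k+1))).foldl max (dpl nums 0) = Mv nums j := by
  induction j with
  | zero => simp [Mv, dpl]
  | succ j ih => rw [List.range_succ, List.map_append, List.foldl_append, ih]; simp [Mv]

theorem getDp_eq (n : Int) (nums : List Int) (h1 : 1 ≤ n) :
    getDp n nums = (List.range n.toNat).map (dpl nums) := by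
  have hmn : ((n.toNat : Nat) : Int) = n := Int.toNat_of_nonneg (by omega)
  have h := getDpInv nums n.toNat (by omega) n.toNat (by omega) (le_refl _)
  rw [hmn] at h
  simp only [Nat.sub_self, List.replicate_zero, List.append_nil] at h
  unfold getDp
  exact h

theorem getDpR_eq (n : Int) (nums : List Int) (h1 : 1 ≤ n) :
    getDpR n nums = (List.range n.toNat).map (fun i => dpr nums n.toNat i) := by
  have hmn : ((n.toNat : Nat) : Int) = n := Int.toNat_of_nonneg (by omega)
  have h := getDpRInv nums n h1 n.toNat (by omega) (by omega)
  rw [show n-1-((n.toNat : Nat):Int) = -1 by omega] at h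
  simp only [Nat.sub_self, List.replicate_zero, List.nil_append, Nat.zero_add] at h
  unfold getDpR
  exact h

theorem solution_eq_ansA (n : Int) (nums : List Int) (h1 : 1 ≤ n) :
    solution n nums = ansA nums n.toNat := by
  have hmn : ((n.toNat : Nat) : Int) = n := Int.toNat_of_nonneg (by omega)
  set m := n.toNat with hm
  have hm1 : 1 ≤ m := by omega
  simp only [solution]
  rw [getDp_eq n nums h1, getDpR_eq n nums h1]
  have hmax : (PySem.List.max? ((List.range m).map (dpl nums)) (fun x => x)).getD 0
      = Mv nums (m-1) := by
    rw [show List.range m = List.range ((m-1)+1) by congr 1; omega,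
      List.range_succ_eq_map, List.map_cons, PySem.List.max?_id_cons]
    rw [List.map_map]
    have : (dpl nums ∘ Nat.succ) = (fun k => dpl nums (k+1)) := by
      funext k; simp [Nat.succ_eq_add_one]
    rw [this, Option.getD_some, Mv_foldl]
  rw [hmax]
  rw [PySem.List.pyRange_one, List.foldl_map,
    show ((n:Int)-1-1).toNat = m - 2 by omega]
  unfold ansA
  apply foldl_ext
  intro acc k hk
  have hkm : k < m - 2 := List.mem_range.mp hk
  rw [show (1:Int)+(k:Int)-1 = ((k:Nat):Int) by ring,
    show (1:Int)+(k:Int)+1 = ((k+2:Nat):Int) by push_cast; ring,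
    PySem.List.pyGetD_natCast, PySem.List.pyGetD_natCast,
    PySem.List.getD_map_range _ _ _ _ (show k < m by omega),
    PySem.List.getD_map_range _ _ _ _ (show k+2 < m by omega),
    ifmax]

theorem solution_alt_eq_Bv (n : Int) (nums : List Int) (h1 : 1 ≤ n) :
    solution_alt n nums = Bv nums (n.toNat - 1) := by
  have hmn : ((n.toNat : Nat) : Int) = n := Int.toNat_of_nonneg (by omega)
  simp only [solution_alt]
  have hz : PySem.List.pyGetD nums 0 0 = xg nums 0 := by
    rw [PySem.List.pyGetD_zero]; rfl
  conv_lhs => rw [hz, show (n:Int) = 1 + ((n.toNat - 1 : Nat) : Int) by omega, altInv]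

-- ===== VERDICT (by name: the statement is the Claim_ definition above) =====
theorem solution_spec : Claim_equal_solution := by
  intro n nums _ hpre
  unfold Spec_solution
  obtain ⟨h1, h2⟩ := hpre
  rw [solution_eq_ansA n nums h1, solution_alt_eq_Bv n nums h1,
    core_eq nums n.toNat (by omega)]
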